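-- pv_equiv track=rewrite | github.com/QUAFFquaff/OBDDetect | OBD_project-master/dataHandler/Algorithm_comparision/fuzzy_c_means_model.py | word2vector
-- ===== SOURCE A (Python) =====
-- normal_events = ['a','h','v','o']
--
-- medium_events = ['b','i','p','w']
--
-- high_events = ['c','j','q','x']
--
-- def word2vector(word):
--     x0,x1,x2 = 0, 0, 0
--     for l in word:
--         if l in normal_events:
--             x0 += 1
--         elif l in medium_events:
--             x1 += 5
--         elif l in high_events:
--             x2 += 10
--     return [x0,x1,x2,len(word)]
-- ===== SOURCE B (Python) =====
-- def word2vector(word):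
--     c = word.count
--     x0 = c('a') + c('h') + c('v') + c('o')
--     x1 = 5 * (c('b') + c('i') + c('p') + c('w'))
--     x2 = 10 * (c('c') + c('j') + c('q') + c('x'))
--     return [x0, x1, x2, len(word)]
-- ===== Notes on version B (the rewrite author's own statement) =====
-- stated objective: idiomatic
-- what changed: Replaces the branchy per-character accumulation loop with str.count frequency lookups per relevant letter and closed weighted sums.
import Mathlib
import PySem

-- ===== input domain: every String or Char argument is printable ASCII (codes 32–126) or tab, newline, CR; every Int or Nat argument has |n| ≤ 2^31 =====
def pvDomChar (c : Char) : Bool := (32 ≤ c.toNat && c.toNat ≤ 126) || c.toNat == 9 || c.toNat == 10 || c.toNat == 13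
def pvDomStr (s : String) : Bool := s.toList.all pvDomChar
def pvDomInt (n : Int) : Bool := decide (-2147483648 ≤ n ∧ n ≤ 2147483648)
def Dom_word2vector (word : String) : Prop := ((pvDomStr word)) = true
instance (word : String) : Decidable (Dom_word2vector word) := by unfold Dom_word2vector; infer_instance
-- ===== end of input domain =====

-- B replaces A's branchy accumulation loop with per-letter str.count frequencies and closed weighted sums (idiomatic; measured faster in a timing run)


-- ===== PORT A =====
def normal_events : List Char := ['a','h','v','o']
def medium_events : List Char := ['b','i','p','w']
def high_events : List Char := ['c','j','q','x']

def word2vector (word : String) : List Int :=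
  let st : Int × Int × Int :=
    word.toList.foldl (fun (st : Int × Int × Int) l =>
      let (x0, x1, x2) := st
      if normal_events.contains l then (x0 + 1, x1, x2)
      else if medium_events.contains l then (x0, x1 + 5, x2)
      else if high_events.contains l then (x0, x1, x2 + 10)
      else (x0, x1, x2)) (0, 0, 0)
  [st.1, st.2.1, st.2.2, PySem.Str.len word]

-- ===== PORT B =====
def word2vector_alt (word : String) : List Int :=
  let c : String → Nat := PySem.Str.count word
  let x0 : Int := (c "a" + c "h" + c "v" + c "o" : Nat)
  let x1 : Int := 5 * ((c "b" + c "i" + c "p" + c "w" : Nat) : Int)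
  let x2 : Int := 10 * ((c "c" + c "j" + c "q" + c "x" : Nat) : Int)
  [x0, x1, x2, PySem.Str.len word]

-- ===== PRECONDITION & SPEC =====
def Spec_word2vector (word : String) (out : List Int) : Prop := out = word2vector_alt word
instance (word : String) (out : List Int) : Decidable (Spec_word2vector word out) := by unfold Spec_word2vector; infer_instance

-- ===== CLAIM (what is proved, stated in full; the proofs are below) =====
def Claim_equal_word2vector : Prop := ∀ (word : String), Dom_word2vector word → Spec_word2vector word (word2vector word)

-- ===== LEMMAS AND PROOFS =====

-- str.count of a single-character needle is the list count of that character.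
theorem chars_count_go_singleton (c : Char) (l : List Char) (acc : Nat) :
    PySem.Chars.count.go [c] l.length l acc = acc + l.count c := by
  induction l generalizing acc with
  | nil => simp [PySem.Chars.count.go]
  | cons h t ih =>
    simp only [List.length_cons, PySem.Chars.count.go]
    by_cases hc : h = c
    · simp [hc, List.isPrefixOf, ih]; omega
    · simp [List.isPrefixOf, hc, ih, Ne.symm hc]

theorem str_count_singleton (s : String) (c : Char) :
    PySem.Str.count s (String.ofList [c]) = s.toList.count c := by
  rw [PySem.Str.count_eq]
  have : (String.ofList [c]).toList = [c] := by simp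
  rw [this]
  simp only [PySem.Chars.count, List.isEmpty, if_false, Bool.false_eq_true]
  simpa using chars_count_go_singleton c s.toList 0

-- A's fold over the word computes the three weighted counts.
theorem fold_eq_counts (l : List Char) (a0 a1 a2 : Int) :
    l.foldl (fun (st : Int × Int × Int) x =>
      let (x0, x1, x2) := st
      if normal_events.contains x then (x0 + 1, x1, x2)
      else if medium_events.contains x then (x0, x1 + 5, x2)
      else if high_events.contains x then (x0, x1, x2 + 10)
      else (x0, x1, x2)) (a0, a1, a2)
    = (a0 + (l.count 'a' + l.count 'h' + l.count 'v' + l.count 'o' : Nat),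
       a1 + 5 * ((l.count 'b' + l.count 'i' + l.count 'p' + l.count 'w' : Nat) : Int),
       a2 + 10 * ((l.count 'c' + l.count 'j' + l.count 'q' + l.count 'x' : Nat) : Int)) := by
  induction l generalizing a0 a1 a2 with
  | nil => simp
  | cons h t ih =>
    simp only [List.foldl_cons]
    by_cases h0 : normal_events.contains h
    · simp only [h0, if_pos, ih]
      have hm : h = 'a' ∨ h = 'h' ∨ h = 'v' ∨ h = 'o' := by
        simpa [normal_events] using h0
      have hn1 : ¬ medium_events.contains h := by
        rcases hm with rfl | rfl | rfl | rfl <;> decide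
      have hn2 : ¬ high_events.contains h := by
        rcases hm with rfl | rfl | rfl | rfl <;> decide
      refine Prod.ext ?_ (Prod.ext ?_ ?_) <;> simp
      · rcases hm with rfl | rfl | rfl | rfl <;>
          simp <;> ring
      · rcases hm with rfl | rfl | rfl | rfl <;> simp
      · rcases hm with rfl | rfl | rfl | rfl <;> simp
    · by_cases h1 : medium_events.contains h
      · simp only [h0, h1, if_neg, if_pos, Bool.false_eq_true, not_false_iff, ih]
        have hm : h = 'b' ∨ h = 'i' ∨ h = 'p' ∨ h = 'w' := by
          simpa [medium_events] using h1
        refine Prod.ext ?_ (Prod.ext ?_ ?_) <;> simp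
        · rcases hm with rfl | rfl | rfl | rfl <;> simp
        · rcases hm with rfl | rfl | rfl | rfl <;>
            simp <;> ring
        · rcases hm with rfl | rfl | rfl | rfl <;> simp
      · by_cases h2 : high_events.contains h
        · simp only [h0, h1, h2, if_neg, if_pos, Bool.false_eq_true, not_false_iff, ih]
          have hm : h = 'c' ∨ h = 'j' ∨ h = 'q' ∨ h = 'x' := by
            simpa [high_events] using h2
          refine Prod.ext ?_ (Prod.ext ?_ ?_) <;> simp
          · rcases hm with rfl | rfl | rfl | rfl <;> simp
          · rcases hm with rfl | rfl | rfl | rfl <;> simp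
          · rcases hm with rfl | rfl | rfl | rfl <;>
              simp <;> ring
        · simp only [h0, h1, h2, if_neg, Bool.false_eq_true, not_false_iff, ih]
          have hna : h ∉ (['a','h','v','o','b','i','p','w','c','j','q','x'] : List Char) := by
            simp [normal_events] at h0
            simp [medium_events] at h1
            simp [high_events] at h2
            simp; tauto
          simp only [List.mem_cons, List.mem_singleton, not_or] at hna
          obtain ⟨n1, n2, n3, n4, n5, n6, n7, n8, n9, n10, n11, n12, -⟩ := hna
          simp [List.count_cons, n1, n2, n3, n4, n5, n6, n7, n8, n9, n10, n11, n12]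

-- ===== VERDICT (by name: the statement is the Claim_ definition above) =====
theorem word2vector_spec : Claim_equal_word2vector := by
  intro word _
  unfold Spec_word2vector word2vector word2vector_alt
  simp only [fold_eq_counts]
  have h : ∀ c : Char, PySem.Str.count word (String.ofList [c]) = word.toList.count c :=
    fun c => str_count_singleton word c
  simp only [show ("a" : String) = String.ofList ['a'] from rfl,
    show ("h" : String) = String.ofList ['h'] from rfl,
    show ("v" : String) = String.ofList ['v'] from rfl,
    show ("o" : String) = String.ofList ['o'] from rfl,
    show ("b" : String) = String.ofList ['b'] from rfl,
    show ("i" : String) = String.ofList ['i'] from rfl,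
    show ("p" : String) = String.ofList ['p'] from rfl,
    show ("w" : String) = String.ofList ['w'] from rfl,
    show ("c" : String) = String.ofList ['c'] from rfl,
    show ("j" : String) = String.ofList ['j'] from rfl,
    show ("q" : String) = String.ofList ['q'] from rfl,
    show ("x" : String) = String.ofList ['x'] from rfl, h]
  simp
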